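-- pv_equiv track=rewrite | github.com/WeStillDontKnowTheAlgorithmWeSawThatDay/AlgorithmStudyOfDestruction | 1주차/PGS_모의고사_리오.py | solution
-- ===== SOURCE A (Python) =====
-- def solution(answers):
--     a = [1,2,3,4,5] * 2000
--     b = [2,1,2,3,2,4,2,5] * 1250
--     c = [3,3,1,1,2,2,4,4,5,5] * 1000
--     c_a = 0
--     c_b = 0
--     c_c = 0
--     for i in range(len(answers)) :
--         if answers[i] == a[i] :
--             c_a += 1
--         if answers[i] == b[i] :
--             c_b += 1
--         if answers[i] == c[i] :
--             c_c += 1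
--     answer = []
--     m = max(c_a, c_b, c_c)
--     if m == c_a :
--         answer.append(1)
--     if m == c_b :
--         answer.append(2)
--     if m == c_c :
--         answer.append(3)
--     return answer
-- ===== SOURCE B (Python) =====
-- def solution(answers):
--     p1 = [1, 2, 3, 4, 5]
--     p2 = [2, 1, 2, 3, 2, 4, 2, 5]
--     p3 = [3, 3, 1, 1, 2, 2, 4, 4, 5, 5]
--     cnt = {}
--     for i, x in enumerate(answers):
--         k = (i % 40, x)
--         cnt[k] = cnt.get(k, 0) + 1
--     s1 = sum(cnt.get((r, p1[r % 5]), 0) for r in range(40))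
--     s2 = sum(cnt.get((r, p2[r % 8]), 0) for r in range(40))
--     s3 = sum(cnt.get((r, p3[r % 10]), 0) for r in range(40))
--     m = max(s1, s2, s3)
--     return [k for k, s in ((1, s1), (2, s2), (3, s3)) if s == m]
-- ===== Notes on version B (the rewrite author's own statement) =====
-- stated objective: alternative
-- what changed: B builds a single (index mod 40, value) histogram dict in one pass over the answers and then computes each pattern's score from 40 dict lookups, instead of A's interleaved scan comparing answers element-wise against three pre-expanded 10000-entry pattern lists.
import Mathlib
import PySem

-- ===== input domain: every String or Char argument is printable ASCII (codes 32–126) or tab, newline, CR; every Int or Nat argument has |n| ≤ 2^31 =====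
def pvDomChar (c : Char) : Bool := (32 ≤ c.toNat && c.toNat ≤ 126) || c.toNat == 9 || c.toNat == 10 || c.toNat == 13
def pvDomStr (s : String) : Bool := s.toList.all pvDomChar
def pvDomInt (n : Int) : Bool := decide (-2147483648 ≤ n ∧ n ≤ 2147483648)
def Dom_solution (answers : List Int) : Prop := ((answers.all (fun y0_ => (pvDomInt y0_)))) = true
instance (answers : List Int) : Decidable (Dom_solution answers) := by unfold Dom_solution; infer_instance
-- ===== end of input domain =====

-- B replaces A's interleaved scan against three pre-expanded 10000-entry pattern lists by one pass
-- building a (index mod 40, value) histogram dict, from which each pattern's score is read off by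
-- 40 lookups (objective: alternative).

-- ===== PORT A =====
def solution (answers : List Int) : List Int :=
  let a : List Int := (List.replicate 2000 ([1, 2, 3, 4, 5] : List Int)).flatten
  let b : List Int := (List.replicate 1250 ([2, 1, 2, 3, 2, 4, 2, 5] : List Int)).flatten
  let c : List Int := (List.replicate 1000 ([3, 3, 1, 1, 2, 2, 4, 4, 5, 5] : List Int)).flatten
  let st := (PySem.List.pyRange 0 (answers.length : Int) 1).foldl
    (fun (st : Int × Int × Int) i =>
      (if PySem.List.pyGetD answers i 0 = PySem.List.pyGetD a i 0 then st.1 + 1 else st.1,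
       if PySem.List.pyGetD answers i 0 = PySem.List.pyGetD b i 0 then st.2.1 + 1 else st.2.1,
       if PySem.List.pyGetD answers i 0 = PySem.List.pyGetD c i 0 then st.2.2 + 1 else st.2.2))
    ((0 : Int), (0 : Int), (0 : Int))
  let m := max st.1 (max st.2.1 st.2.2)
  let answer : List Int := (if m = st.1 then [1] else [])
  let answer := answer ++ (if m = st.2.1 then [2] else [])
  let answer := answer ++ (if m = st.2.2 then [3] else [])
  answer

-- ===== PORT B =====
def solution_alt (answers : List Int) : List Int :=
  let p1 : List Int := [1, 2, 3, 4, 5]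
  let p2 : List Int := [2, 1, 2, 3, 2, 4, 2, 5]
  let p3 : List Int := [3, 3, 1, 1, 2, 2, 4, 4, 5, 5]
  let cnt := (PySem.List.enumerate answers 0).foldl
    (fun (d : PySem.Dict (Int × Int) Int) ix =>
      d.insert (PySem.Int.mod ix.1 40, ix.2) (d.getD (PySem.Int.mod ix.1 40, ix.2) 0 + 1))
    PySem.Dict.empty
  let s1 := ((PySem.List.pyRange 0 40 1).map
    (fun r => cnt.getD (r, PySem.List.pyGetD p1 (PySem.Int.mod r 5) 0) 0)).sum
  let s2 := ((PySem.List.pyRange 0 40 1).map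
    (fun r => cnt.getD (r, PySem.List.pyGetD p2 (PySem.Int.mod r 8) 0) 0)).sum
  let s3 := ((PySem.List.pyRange 0 40 1).map
    (fun r => cnt.getD (r, PySem.List.pyGetD p3 (PySem.Int.mod r 10) 0) 0)).sum
  let m := max s1 (max s2 s3)
  (([((1 : Int), s1), (2, s2), (3, s3)]).filter (fun ks => ks.2 == m)).map (fun ks => ks.1)

-- ===== PRECONDITION & SPEC =====
-- Pre_ excludes lists longer than 10000, on which A raises IndexError (its expanded pattern lists
-- have exactly 10000 entries); B returns a value there.
def Pre_solution (answers : List Int) : Prop := answers.length ≤ 10000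
instance (answers : List Int) : Decidable (Pre_solution answers) := by unfold Pre_solution; infer_instance
def pvWitness_solution : List Int := [1, 3, 2, 4, 2]

def Spec_solution (answers : List Int) (out : List Int) : Prop := out = solution_alt answers
instance (answers : List Int) (out : List Int) : Decidable (Spec_solution answers out) := by unfold Spec_solution; infer_instance

-- ===== CLAIM (what is proved, stated in full; the proofs are below) =====
def Claim_equal_solution : Prop := ∀ (answers : List Int), Dom_solution answers → Pre_solution answers → Spec_solution answers (solution answers)

-- ===== LEMMAS AND PROOFS =====

/-- Match count of `xs` against pattern `p` read cyclically starting at offset `i`. -/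
def mcount (p : List Int) : List Int → Nat → Int
  | [], _ => 0
  | x :: xs, i => (if x = p.getD (i % p.length) 0 then 1 else 0) + mcount p xs (i + 1)

theorem getD_flatten_replicate (l : List Int) :
    ∀ (k i : Nat), i < k * l.length →
      ((List.replicate k l).flatten).getD i 0 = l.getD (i % l.length) 0 := by
  intro k
  induction k with
  | zero => intro i h; omega
  | succ k ih =>
    intro i h
    rw [List.replicate_succ, List.flatten_cons]
    by_cases hi : i < l.length
    · rw [List.getD_append _ _ _ _ hi, Nat.mod_eq_of_lt hi]
    · have hi' : l.length ≤ i := le_of_not_gt hi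
      rw [List.getD_append_right _ _ _ _ hi']
      have hs : (k + 1) * l.length = k * l.length + l.length := by ring
      have h2 : i - l.length < k * l.length := by omega
      rw [ih _ h2]
      congr 1
      conv_rhs => rw [show i = (i - l.length) + l.length from (Nat.sub_add_cancel hi').symm]
      rw [Nat.add_mod_right]

theorem foldl_prod3 {α : Type} (P1 P2 P3 : α → Prop) [DecidablePred P1] [DecidablePred P2]
    [DecidablePred P3] :
    ∀ (L : List α) (st : Int × Int × Int),
      L.foldl (fun st i =>
          (if P1 i then st.1 + 1 else st.1,
           if P2 i then st.2.1 + 1 else st.2.1,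
           if P3 i then st.2.2 + 1 else st.2.2)) st
        = (L.foldl (fun a i => if P1 i then a + 1 else a) st.1,
           L.foldl (fun a i => if P2 i then a + 1 else a) st.2.1,
           L.foldl (fun a i => if P3 i then a + 1 else a) st.2.2) := by
  intro L
  induction L with
  | nil => intro st; rfl
  | cons x xs ih => intro st; simp [List.foldl_cons, ih]

theorem foldl_range_mcount (p : List Int) :
    ∀ (xs : List Int) (i0 : Nat) (s : Int),
      (List.range xs.length).foldl
        (fun acc k => if xs.getD k 0 = p.getD ((i0 + k) % p.length) 0 then acc + 1 else acc) s
        = s + mcount p xs i0 := by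
  intro xs
  induction xs with
  | nil => intro i0 s; simp [mcount]
  | cons x xs ih =>
    intro i0 s
    rw [List.length_cons, List.range_succ_eq_map, List.foldl_cons, List.foldl_map]
    rw [PySem.List.foldl_congr_mem _ _
        (fun acc k => if xs.getD k 0 = p.getD (((i0 + 1) + k) % p.length) 0 then acc + 1 else acc) _
        (by
          intro acc k _
          simp only [Nat.succ_eq_add_one, List.getD_cons_succ]
          rw [show i0 + (k + 1) = (i0 + 1) + k from by omega])]
    rw [ih (i0 + 1)]
    simp only [List.getD_cons_zero, Nat.add_zero, mcount]
    split <;> ring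

theorem count_eq (p : List Int) (K : Nat) (answers : List Int)
    (hlen : answers.length ≤ K * p.length) :
    (List.range answers.length).foldl
      (fun acc k =>
        if answers.getD k 0 = ((List.replicate K p).flatten).getD k 0 then acc + 1 else acc)
      (0 : Int) = mcount p answers 0 := by
  have hcong : ∀ (acc : Int), ∀ k ∈ List.range answers.length,
      (if answers.getD k 0 = ((List.replicate K p).flatten).getD k 0 then acc + 1 else acc)
        = (if answers.getD k 0 = p.getD ((0 + k) % p.length) 0 then acc + 1 else acc) := by
    intro acc k hk
    have hk' : k < K * p.length := lt_of_lt_of_le (List.mem_range.mp hk) hlen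
    rw [getD_flatten_replicate p K k hk', Nat.zero_add]
  rw [PySem.List.foldl_congr_mem _ _ _ _ hcong, foldl_range_mcount p answers 0 0]
  ring

/-- The score a pattern `p` (with length cast `L`) reads off a histogram dict. -/
def dscore (p : List Int) (L : Int) (d : PySem.Dict (Int × Int) Int) : Int :=
  ((PySem.List.pyRange 0 40 1).map
    (fun r => d.getD (r, PySem.List.pyGetD p (PySem.Int.mod r L) 0) 0)).sum

theorem sum_range_single (j : Nat) (c : Int) :
    ∀ n, j < n → ((List.range n).map (fun r => if r = j then c else 0)).sum = c := by
  intro n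
  induction n with
  | zero => omega
  | succ n ih =>
    intro hj
    rw [List.range_succ, List.map_append, List.sum_append]
    by_cases h : j < n
    · simp [ih h, Nat.ne_of_gt h]
    · have hjn : j = n := by omega
      have hmap : ((List.range n).map (fun r => if r = j then c else 0))
          = (List.range n).map (fun _ => (0 : Int)) := by
        apply List.map_congr_left; intro r hr; simp only [List.mem_range] at hr
        simp only [if_neg (by omega : ¬ r = j)]
      rw [hmap]; simp [hjn]

theorem pyRange40 :
    PySem.List.pyRange 0 40 1 = List.map (fun r : Nat => (r : Int)) (List.range 40) := by decide

theorem dscore_insert (p : List Int) (L : Int) (d : PySem.Dict (Int × Int) Int)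
    (j : Nat) (hj : j < 40) (x : Int) :
    dscore p L (d.insert ((j : Int), x) (d.getD ((j : Int), x) 0 + 1))
      = dscore p L d
        + (if x = PySem.List.pyGetD p (PySem.Int.mod (j : Int) L) 0 then 1 else 0) := by
  unfold dscore
  rw [pyRange40]
  simp only [List.map_map, Function.comp_def]
  have hpt : ((List.range 40).map
      (fun r : Nat => (d.insert ((j : Int), x) (d.getD ((j : Int), x) 0 + 1)).getD
        ((r : Int), PySem.List.pyGetD p (PySem.Int.mod (r : Int) L) 0) 0))
      = (List.range 40).map (fun r : Nat =>
          d.getD ((r : Int), PySem.List.pyGetD p (PySem.Int.mod (r : Int) L) 0) 0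
          + (if r = j ∧ x = PySem.List.pyGetD p (PySem.Int.mod (j : Int) L) 0
             then (1 : Int) else 0)) := by
    apply List.map_congr_left
    intro r _
    rw [PySem.Dict.getD_insert]
    by_cases hc : ((r : Int), PySem.List.pyGetD p (PySem.Int.mod (r : Int) L) 0) = ((j : Int), x)
    · have h1 : (r : Int) = (j : Int) := congrArg Prod.fst hc
      have h2 : PySem.List.pyGetD p (PySem.Int.mod (r : Int) L) 0 = x := congrArg Prod.snd hc
      have hrj : r = j := by exact_mod_cast h1
      rw [if_pos hc, if_pos ⟨hrj, by rw [← hrj, ← h2]⟩]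
      rw [hrj] at h2
      rw [hrj, h2]
    · rw [if_neg hc, if_neg (by
        rintro ⟨hrj, hx⟩
        exact hc (by rw [hrj, hx])), add_zero]
  rw [hpt, PySem.List.sum_map_add_int]
  congr 1
  by_cases hx : x = PySem.List.pyGetD p (PySem.Int.mod (j : Int) L) 0
  · rw [if_pos hx]
    rw [List.map_congr_left (l := List.range 40)
      (f := fun r : Nat =>
        if r = j ∧ x = PySem.List.pyGetD p (PySem.Int.mod (j : Int) L) 0 then (1 : Int) else 0)
      (g := fun r : Nat => if r = j then (1 : Int) else 0)
      (by intro r _; by_cases h : r = j <;> simp [h, hx])]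
    exact sum_range_single j 1 40 hj
  · rw [if_neg hx]
    rw [List.map_congr_left (l := List.range 40)
      (f := fun r : Nat =>
        if r = j ∧ x = PySem.List.pyGetD p (PySem.Int.mod (j : Int) L) 0 then (1 : Int) else 0)
      (g := fun _ : Nat => (0 : Int))
      (by intro r _; simp [hx])]
    simp

theorem dscore_build (p : List Int) (L : Int) (hL : L = (p.length : Int))
    (hdvd : p.length ∣ 40) :
    ∀ (xs : List Int) (i0 : Nat) (d : PySem.Dict (Int × Int) Int),
      dscore p L ((PySem.List.enumerate xs (i0 : Int)).foldl
        (fun d ix =>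
          d.insert (PySem.Int.mod ix.1 40, ix.2) (d.getD (PySem.Int.mod ix.1 40, ix.2) 0 + 1)) d)
      = dscore p L d + mcount p xs i0 := by
  intro xs
  induction xs with
  | nil => intro i0 d; simp [PySem.List.enumerate_nil, mcount]
  | cons x xs ih =>
    intro i0 d
    rw [PySem.List.enumerate_cons, List.foldl_cons,
        show ((i0 : Int) + 1) = (((i0 + 1 : Nat)) : Int) by push_cast; ring,
        ih (i0 + 1)]
    have hmod : PySem.Int.mod (i0 : Int) 40 = ((i0 % 40 : Nat) : Int) := by
      exact_mod_cast PySem.Int.mod_natCast i0 40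
    rw [hmod, dscore_insert p L d (i0 % 40) (by omega) x]
    have hmod2 : PySem.Int.mod ((i0 % 40 : Nat) : Int) L = ((i0 % p.length : Nat) : Int) := by
      rw [hL,
          show (PySem.Int.mod ((i0 % 40 : Nat) : Int) ((p.length : Nat) : Int))
              = (((i0 % 40) % p.length : Nat) : Int) from by
            exact_mod_cast PySem.Int.mod_natCast (i0 % 40) p.length,
          Nat.mod_mod_of_dvd i0 hdvd]
    rw [hmod2, PySem.List.pyGetD_natCast]
    simp only [mcount, List.getD]
    ring

/-- B's port, rewritten through `dscore_build`: each score is the cyclic match count. -/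
theorem alt_eq_mcount (answers : List Int) :
    solution_alt answers
      = (([((1 : Int), mcount [1, 2, 3, 4, 5] answers 0),
           (2, mcount [2, 1, 2, 3, 2, 4, 2, 5] answers 0),
           (3, mcount [3, 3, 1, 1, 2, 2, 4, 4, 5, 5] answers 0)]).filter
          (fun ks => ks.2 == max (mcount [1, 2, 3, 4, 5] answers 0)
            (max (mcount [2, 1, 2, 3, 2, 4, 2, 5] answers 0)
              (mcount [3, 3, 1, 1, 2, 2, 4, 4, 5, 5] answers 0)))).map (fun ks => ks.1) := by
  have hb1 := dscore_build [1, 2, 3, 4, 5] 5 (by decide) (by decide) answers 0 PySem.Dict.empty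
  have hb2 := dscore_build [2, 1, 2, 3, 2, 4, 2, 5] 8 (by decide) (by decide) answers 0
    PySem.Dict.empty
  have hb3 := dscore_build [3, 3, 1, 1, 2, 2, 4, 4, 5, 5] 10 (by decide) (by decide) answers 0
    PySem.Dict.empty
  simp only [Nat.cast_zero] at hb1 hb2 hb3
  rw [show dscore [1, 2, 3, 4, 5] 5 PySem.Dict.empty = 0 from by decide, zero_add] at hb1
  rw [show dscore [2, 1, 2, 3, 2, 4, 2, 5] 8 PySem.Dict.empty = 0 from by decide, zero_add] at hb2
  rw [show dscore [3, 3, 1, 1, 2, 2, 4, 4, 5, 5] 10 PySem.Dict.empty = 0 from by decide,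
      zero_add] at hb3
  simp only [dscore] at hb1 hb2 hb3
  simp only [solution_alt]
  rw [hb1, hb2, hb3]

theorem tail_shape (c1 c2 c3 : Int) :
    (((if max c1 (max c2 c3) = c1 then [(1 : Int)] else []) ++
      (if max c1 (max c2 c3) = c2 then [2] else [])) ++
      (if max c1 (max c2 c3) = c3 then [3] else []))
    = (([((1 : Int), c1), (2, c2), (3, c3)]).filter
        (fun ks => ks.2 == max c1 (max c2 c3))).map (fun ks => ks.1) := by
  have hm : max c1 (max c2 c3) = c1 ∨ max c1 (max c2 c3) = c2 ∨ max c1 (max c2 c3) = c3 := by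
    rcases max_choice c1 (max c2 c3) with h | h
    · exact Or.inl h
    · rcases max_choice c2 c3 with h' | h' <;> rw [h, h'] <;> simp
  rw [List.filter_cons, List.filter_cons, List.filter_cons, List.filter_nil]
  split_ifs <;>
    first
      | (simp; done)
      | (simp only [beq_iff_eq] at *; omega)

-- ===== VERDICT (by name: the statement is the Claim_ definition above) =====
theorem solution_spec : Claim_equal_solution := by
  intro answers hdom hpre
  unfold Spec_solution
  unfold Pre_solution at hpre
  show solution answers = solution_alt answers
  have hA : (PySem.List.pyRange 0 (answers.length : Int) 1).foldl
      (fun (st : Int × Int × Int) i =>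
        (if PySem.List.pyGetD answers i 0 =
            PySem.List.pyGetD ((List.replicate 2000 ([1, 2, 3, 4, 5] : List Int)).flatten) i 0
          then st.1 + 1 else st.1,
         if PySem.List.pyGetD answers i 0 =
            PySem.List.pyGetD ((List.replicate 1250 ([2, 1, 2, 3, 2, 4, 2, 5] : List Int)).flatten) i 0
          then st.2.1 + 1 else st.2.1,
         if PySem.List.pyGetD answers i 0 =
            PySem.List.pyGetD ((List.replicate 1000 ([3, 3, 1, 1, 2, 2, 4, 4, 5, 5] : List Int)).flatten) i 0
          then st.2.2 + 1 else st.2.2))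
      ((0 : Int), (0 : Int), (0 : Int))
      = (mcount [1, 2, 3, 4, 5] answers 0,
         mcount [2, 1, 2, 3, 2, 4, 2, 5] answers 0,
         mcount [3, 3, 1, 1, 2, 2, 4, 4, 5, 5] answers 0) := by
    simp only [PySem.List.pyRange_zero_nat, List.foldl_map, PySem.List.pyGetD_natCast]
    rw [foldl_prod3]
    rw [count_eq [1, 2, 3, 4, 5] 2000 answers (by simpa using hpre),
        count_eq [2, 1, 2, 3, 2, 4, 2, 5] 1250 answers (by simpa using hpre),
        count_eq [3, 3, 1, 1, 2, 2, 4, 4, 5, 5] 1000 answers (by simpa using hpre)]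
  rw [alt_eq_mcount]
  simp only [solution]
  rw [hA]
  dsimp only
  exact tail_shape _ _ _
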